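-- pv_equiv track=rewrite | github.com/hari-114/Chalo_Python | python_mowa/LB1.py | to_integer
-- ===== SOURCE A (Python) =====
-- def to_integer(n):
--     result=0
--     power=0
--     while n>0:
--         digit=n%10
--         result+=digit*(2**power)
--         power+=1
--         n//=10
--     return result
-- ===== SOURCE B (Python) =====
-- def to_integer(n):
--     if n <= 0:
--         return 0
--     return n % 10 + 2 * to_integer(n // 10)
-- ===== Notes on version B (the rewrite author's own statement) =====
-- stated objective: simpler
-- what changed: Replaces the iterative loop that tracks a separate power counter and multiplies each digit by a computed power of two with a direct structural recursion (last digit plus twice the recursive call on the remaining digits), removing the power/result state entirely.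
import Mathlib
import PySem

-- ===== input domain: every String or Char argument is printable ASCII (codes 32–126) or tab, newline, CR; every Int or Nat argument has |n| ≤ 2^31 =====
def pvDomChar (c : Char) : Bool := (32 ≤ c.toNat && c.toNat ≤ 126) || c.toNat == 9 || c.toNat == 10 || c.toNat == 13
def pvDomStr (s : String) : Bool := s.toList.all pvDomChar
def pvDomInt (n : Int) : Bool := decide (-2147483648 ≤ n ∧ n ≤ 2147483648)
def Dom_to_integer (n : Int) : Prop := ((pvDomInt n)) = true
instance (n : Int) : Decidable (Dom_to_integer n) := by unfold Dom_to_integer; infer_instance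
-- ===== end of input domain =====

-- B replaces A's loop (separate power counter, digit*(2**power) accumulator) by a direct
-- recursion n%10 + 2*to_integer(n//10); objective: simpler.


-- ===== PORT A =====
-- A's while loop: state (n, result, power), result += (n%10)*(2**power); power += 1; n //= 10
def toIntegerLoop (n result : Int) (power : Nat) : Int :=
  if n > 0 then
    toIntegerLoop (PySem.Int.floordiv n 10) (result + PySem.Int.mod n 10 * 2 ^ power) (power + 1)
  else result
termination_by n.toNat
decreasing_by
  rw [PySem.Int.floordiv_eq_ediv_of_pos (by norm_num : (0:Int) < 10)]
  omega

def to_integer (n : Int) : Int := toIntegerLoop n 0 0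

-- ===== PORT B =====
def to_integer_alt (n : Int) : Int :=
  if n ≤ 0 then 0
  else PySem.Int.mod n 10 + 2 * to_integer_alt (PySem.Int.floordiv n 10)
termination_by n.toNat
decreasing_by
  rw [PySem.Int.floordiv_eq_ediv_of_pos (by norm_num : (0:Int) < 10)]
  omega

-- ===== PRECONDITION & SPEC =====
def Spec_to_integer (n : Int) (out : Int) : Prop := out = to_integer_alt n
instance (n : Int) (out : Int) : Decidable (Spec_to_integer n out) := by unfold Spec_to_integer; infer_instance

-- ===== CLAIM (what is proved, stated in full; the proofs are below) =====
def Claim_equal_to_integer : Prop := ∀ (n : Int), Dom_to_integer n → Spec_to_integer n (to_integer n)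

-- ===== LEMMAS AND PROOFS =====
-- Loop invariant: A's loop adds 2^power times B's value to the accumulator.
theorem loop_eq (k : Nat) : ∀ (n result : Int) (power : Nat), n.toNat ≤ k →
    toIntegerLoop n result power = result + 2 ^ power * to_integer_alt n := by
  induction k with
  | zero =>
    intro n result power hk
    have hn : ¬ n > 0 := by omega
    rw [toIntegerLoop, to_integer_alt]
    simp [hn, show n ≤ 0 by omega]
  | succ k ih =>
    intro n result power hk
    by_cases hn : n > 0
    · have hdiv : (PySem.Int.floordiv n 10).toNat ≤ k := by
        rw [PySem.Int.floordiv_eq_ediv_of_pos (by norm_num : (0:Int) < 10)]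
        omega
      rw [toIntegerLoop, to_integer_alt]
      simp only [hn, if_pos, show ¬ n ≤ 0 by omega, ite_false]
      rw [ih _ _ _ hdiv]
      ring
    · rw [toIntegerLoop, to_integer_alt]
      simp [hn, show n ≤ 0 by omega]

-- ===== VERDICT (by name: the statement is the Claim_ definition above) =====
theorem to_integer_spec : Claim_equal_to_integer := by
  intro n _
  show to_integer n = to_integer_alt n
  rw [to_integer, loop_eq n.toNat n 0 0 le_rfl]
  ring
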